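-- pv_equiv track=rewrite | github.com/GuillaumeVerb/ai-data-investigator | app/ui/streamlit_app.py | detect_business_levers
-- ===== SOURCE A (Python) =====
-- def detect_business_levers(profile: dict, lang: str) -> list[str]:
--     columns = [column.lower() for column in profile["columns"]]
--     levers: list[str] = []
--     if any(keyword in column for column in columns for keyword in ["price", "discount"]):
--         levers.append("Pricing and discount strategy" if lang == "en" else "Strategie prix et remise")
--     if any(keyword in column for column in columns for keyword in ["marketing", "campaign", "spend"]):
--         levers.append("Marketing allocation" if lang == "en" else "Allocation marketing")
--     if any(keyword in column for column in columns for keyword in ["region", "segment", "channel", "customer"]):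
--         levers.append("Segment and regional prioritization" if lang == "en" else "Priorisation segment et region")
--     if any(keyword in column for column in columns for keyword in ["product", "sku", "category", "mix"]):
--         levers.append("Product mix and assortment" if lang == "en" else "Mix produit et assortiment")
--     if profile.get("temporal_columns"):
--         levers.append("Trend and anomaly monitoring" if lang == "en" else "Suivi de tendance et d'anomalies")
--     if not levers:
--         levers.append("Baseline operational diagnosis" if lang == "en" else "Diagnostic operationnel de base")
--     return levers[:5]
-- ===== SOURCE B (Python) =====
-- def detect_business_levers(profile: dict, lang: str) -> list[str]:
--     en = lang == "en"
--     # single column-major pass accumulating one flag per lever family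
--     p = m = s = x = False
--     for column in profile["columns"]:
--         c = column.lower()
--         p = p or "price" in c or "discount" in c
--         m = m or "marketing" in c or "campaign" in c or "spend" in c
--         s = s or "region" in c or "segment" in c or "channel" in c or "customer" in c
--         x = x or "product" in c or "sku" in c or "category" in c or "mix" in c
--     levers = (
--         (["Pricing and discount strategy" if en else "Strategie prix et remise"] if p else [])
--         + (["Marketing allocation" if en else "Allocation marketing"] if m else [])
--         + (["Segment and regional prioritization" if en else "Priorisation segment et region"] if s else [])
--         + (["Product mix and assortment" if en else "Mix produit et assortiment"] if x else [])
--         + (["Trend and anomaly monitoring" if en else "Suivi de tendance et d'anomalies"]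
--            if profile.get("temporal_columns") else [])
--     )
--     return (levers or ["Baseline operational diagnosis" if en else "Diagnostic operationnel de base"])[:5]
-- ===== Notes on version B (the rewrite author's own statement) =====
-- stated objective: alternative
-- what changed: B traverses the columns once, column-major, accumulating four boolean flags (one per lever family) instead of A's four separate rule-major any-scans over the column list, then assembles the result by concatenating conditional singletons with the levers-or-fallback expression.
import Mathlib
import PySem

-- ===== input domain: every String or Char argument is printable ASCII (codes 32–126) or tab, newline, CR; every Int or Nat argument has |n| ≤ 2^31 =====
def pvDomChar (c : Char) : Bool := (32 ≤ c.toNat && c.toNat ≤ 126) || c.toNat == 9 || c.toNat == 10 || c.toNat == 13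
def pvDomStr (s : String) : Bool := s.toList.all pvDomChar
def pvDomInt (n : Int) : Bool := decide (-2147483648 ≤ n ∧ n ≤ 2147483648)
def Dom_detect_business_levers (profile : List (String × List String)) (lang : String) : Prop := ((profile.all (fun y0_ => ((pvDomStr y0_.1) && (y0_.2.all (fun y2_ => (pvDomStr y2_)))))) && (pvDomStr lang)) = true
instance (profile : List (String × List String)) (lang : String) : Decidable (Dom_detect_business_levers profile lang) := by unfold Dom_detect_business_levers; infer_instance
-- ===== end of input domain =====

-- B scans the columns once, column-major, accumulating four boolean flags, instead of
-- A's four rule-major any-scans over the column list; same asymptotic cost.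

-- ===== PORT A =====
-- dict lookup on the association list: first match (insertion order)
def pvLookup (profile : List (String × List String)) (k : String) : Option (List String) :=
  (profile.find? (fun p => p.1 == k)).map (·.2)

-- `profile.get("temporal_columns")` truthiness: present and non-empty list
def pvTemporal (profile : List (String × List String)) : Bool :=
  match pvLookup profile "temporal_columns" with
  | some tc => !tc.isEmpty
  | none => false

def detect_business_levers (profile : List (String × List String)) (lang : String) : List String :=
  let columns := ((pvLookup profile "columns").getD []).map PySem.Str.lower
  let levers : List String := []
  let levers := if columns.any (fun c => (["price", "discount"]).any (fun k => PySem.Str.isIn k c))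
    then levers ++ [if lang == "en" then "Pricing and discount strategy" else "Strategie prix et remise"] else levers
  let levers := if columns.any (fun c => (["marketing", "campaign", "spend"]).any (fun k => PySem.Str.isIn k c))
    then levers ++ [if lang == "en" then "Marketing allocation" else "Allocation marketing"] else levers
  let levers := if columns.any (fun c => (["region", "segment", "channel", "customer"]).any (fun k => PySem.Str.isIn k c))
    then levers ++ [if lang == "en" then "Segment and regional prioritization" else "Priorisation segment et region"] else levers
  let levers := if columns.any (fun c => (["product", "sku", "category", "mix"]).any (fun k => PySem.Str.isIn k c))
    then levers ++ [if lang == "en" then "Product mix and assortment" else "Mix produit et assortiment"] else levers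
  let levers := if pvTemporal profile
    then levers ++ [if lang == "en" then "Trend and anomaly monitoring" else "Suivi de tendance et d'anomalies"] else levers
  let levers := if levers.isEmpty
    then levers ++ [if lang == "en" then "Baseline operational diagnosis" else "Diagnostic operationnel de base"] else levers
  PySem.List.slice levers none (some 5)

-- ===== PORT B =====
-- one step of B's column-major pass: or-in each flag from the lowered column
def pvStep (h : Bool × Bool × Bool × Bool) (column : String) : Bool × Bool × Bool × Bool :=
  let c := PySem.Str.lower column
  (h.1 || PySem.Str.isIn "price" c || PySem.Str.isIn "discount" c,
   h.2.1 || PySem.Str.isIn "marketing" c || PySem.Str.isIn "campaign" c || PySem.Str.isIn "spend" c,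
   h.2.2.1 || PySem.Str.isIn "region" c || PySem.Str.isIn "segment" c || PySem.Str.isIn "channel" c || PySem.Str.isIn "customer" c,
   h.2.2.2 || PySem.Str.isIn "product" c || PySem.Str.isIn "sku" c || PySem.Str.isIn "category" c || PySem.Str.isIn "mix" c)

def detect_business_levers_alt (profile : List (String × List String)) (lang : String) : List String :=
  let en := lang == "en"
  let h := ((pvLookup profile "columns").getD []).foldl pvStep (false, false, false, false)
  let levers :=
    (if h.1 then [if en then "Pricing and discount strategy" else "Strategie prix et remise"] else [])
    ++ (if h.2.1 then [if en then "Marketing allocation" else "Allocation marketing"] else [])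
    ++ (if h.2.2.1 then [if en then "Segment and regional prioritization" else "Priorisation segment et region"] else [])
    ++ (if h.2.2.2 then [if en then "Product mix and assortment" else "Mix produit et assortiment"] else [])
    ++ (if pvTemporal profile then [if en then "Trend and anomaly monitoring" else "Suivi de tendance et d'anomalies"] else [])
  PySem.List.slice (if levers.isEmpty then [if en then "Baseline operational diagnosis" else "Diagnostic operationnel de base"] else levers) none (some 5)

-- ===== PRECONDITION & SPEC =====
-- A (and B) raise KeyError when the key "columns" is absent; exactly those inputs are excluded.
def Pre_detect_business_levers (profile : List (String × List String)) (lang : String) : Prop :=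
  (profile.any (fun p => p.1 == "columns")) = true
instance (profile : List (String × List String)) (lang : String) : Decidable (Pre_detect_business_levers profile lang) := by unfold Pre_detect_business_levers; infer_instance

def pvWitness_detect_business_levers : (List (String × List String)) × String :=
  ([("columns", ["Price", "region"])], "en")

def Spec_detect_business_levers (profile : List (String × List String)) (lang : String) (out : List String) : Prop := out = detect_business_levers_alt profile lang
instance (profile : List (String × List String)) (lang : String) (out : List String) : Decidable (Spec_detect_business_levers profile lang out) := by unfold Spec_detect_business_levers; infer_instance

-- ===== CLAIM (what is proved, stated in full; the proofs are below) =====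
def Claim_equal_detect_business_levers : Prop := ∀ (profile : List (String × List String)) (lang : String), Dom_detect_business_levers profile lang → Pre_detect_business_levers profile lang → Spec_detect_business_levers profile lang (detect_business_levers profile lang)

-- ===== LEMMAS AND PROOFS =====
-- B's fold computes, in each component, the disjunction of the initial flag with an `any` over the columns.
theorem pv_foldl_step (cols : List String) (h : Bool × Bool × Bool × Bool) :
    cols.foldl pvStep h =
      (h.1 || cols.any (fun col => (["price", "discount"]).any (fun k => PySem.Str.isIn k (PySem.Str.lower col))),
       h.2.1 || cols.any (fun col => (["marketing", "campaign", "spend"]).any (fun k => PySem.Str.isIn k (PySem.Str.lower col))),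
       h.2.2.1 || cols.any (fun col => (["region", "segment", "channel", "customer"]).any (fun k => PySem.Str.isIn k (PySem.Str.lower col))),
       h.2.2.2 || cols.any (fun col => (["product", "sku", "category", "mix"]).any (fun k => PySem.Str.isIn k (PySem.Str.lower col)))) := by
  induction cols generalizing h with
  | nil => simp
  | cons c t ih =>
    simp only [List.foldl_cons, List.any_cons, ih, pvStep]
    simp [Bool.or_assoc]

-- assembling the lever list: A's sequential conditional appends equal B's concatenation
-- of conditional singletons with the direct fallback (case split on the five flags)
theorem pv_assemble (b1 b2 b3 b4 bt : Bool) (s1 s2 s3 s4 st f : String) :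
    (let l0 : List String := []
     let l1 := if b1 then l0 ++ [s1] else l0
     let l2 := if b2 then l1 ++ [s2] else l1
     let l3 := if b3 then l2 ++ [s3] else l2
     let l4 := if b4 then l3 ++ [s4] else l3
     let l5 := if bt then l4 ++ [st] else l4
     let l6 := if l5.isEmpty then l5 ++ [f] else l5
     PySem.List.slice l6 none (some 5)) =
    (let levers := (if b1 then [s1] else []) ++ (if b2 then [s2] else []) ++
                   (if b3 then [s3] else []) ++ (if b4 then [s4] else []) ++
                   (if bt then [st] else [])
     PySem.List.slice (if levers.isEmpty then [f] else levers) none (some 5)) := by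
  cases b1 <;> cases b2 <;> cases b3 <;> cases b4 <;> cases bt <;> simp

-- ===== VERDICT (by name: the statement is the Claim_ definition above) =====
theorem detect_business_levers_spec : Claim_equal_detect_business_levers := by
  intro profile lang _ _
  unfold Spec_detect_business_levers detect_business_levers detect_business_levers_alt
  rw [pv_foldl_step]
  simp only [Bool.false_or, List.any_map, Function.comp_def]
  exact pv_assemble _ _ _ _ _ _ _ _ _ _ _
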